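-- pv_equiv track=rewrite | github.com/MDandersonm/this-is-coding-test | windmil-test/test6-1.py | count_loss_cases
-- ===== SOURCE A (Python) =====
-- def count_loss_cases(n, m, k, turn=0):
--     # Base Cases
--     # n 또는 m이 0이면 경우의 수 1을 반환
--     if n == 0 or m == 0:
--         return 1
--     # k번 진행 후 아무도 구슬을 잃지 않았다면 경우의 수 0을 반환
--     if turn == k:
--         return 0
--
--     # 구름이가 이기는 경우 (상대방의 구슬 1개 감소 ,내꺼 하나증가)
--     case1 = count_loss_cases(n+1, m - 1, k, turn + 1)
--     # 구름이가 지는 경우 (구름이의 구슬 1개 감소, 내꺼 하나 감소)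
--     case2 = count_loss_cases(n - 1, m+1, k, turn + 1)
--     # 무승부의 경우 (아무 변화 없음)
--     case3 = count_loss_cases(n, m, k, turn + 1)
--     return case1 + case2 + case3
-- ===== SOURCE B (Python) =====
-- def count_loss_cases(n, m, k, turn=0):
--     # Bottom-up DP over (turn level, n); n+m is invariant so only n is tracked.
--     if n == 0 or m == 0:
--         return 1
--     if turn >= k:
--         return 0
--     s = n + m
--     d = k - turn
--     cur = [1 if (n - d + i == 0 or n - d + i == s) else 0 for i in range(2 * d + 1)]
--     for level in range(d - 1, -1, -1):
--         lo = n - level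
--         nxt = []
--         for i in range(2 * level + 1):
--             x = lo + i
--             nxt.append(1 if (x == 0 or x == s) else cur[i] + cur[i + 1] + cur[i + 2])
--         cur = nxt
--     return cur[0]
-- ===== Notes on version B (the rewrite author's own statement) =====
-- stated objective: alternative
-- what changed: Replaces the ternary-branching recursion with a bottom-up dynamic program over (turn level, n): n+m is invariant, so each level is a list of values indexed by n, built from the level below it.
-- crash fix: When n and m are both nonzero and turn > k, A recurses forever (RecursionError); B returns 0, since no loss can occur in a non-positive number of remaining turns. — e.g. on count_loss_cases(1, 1, 0, 1): A raises RecursionError, B returns 0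
import Mathlib
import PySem

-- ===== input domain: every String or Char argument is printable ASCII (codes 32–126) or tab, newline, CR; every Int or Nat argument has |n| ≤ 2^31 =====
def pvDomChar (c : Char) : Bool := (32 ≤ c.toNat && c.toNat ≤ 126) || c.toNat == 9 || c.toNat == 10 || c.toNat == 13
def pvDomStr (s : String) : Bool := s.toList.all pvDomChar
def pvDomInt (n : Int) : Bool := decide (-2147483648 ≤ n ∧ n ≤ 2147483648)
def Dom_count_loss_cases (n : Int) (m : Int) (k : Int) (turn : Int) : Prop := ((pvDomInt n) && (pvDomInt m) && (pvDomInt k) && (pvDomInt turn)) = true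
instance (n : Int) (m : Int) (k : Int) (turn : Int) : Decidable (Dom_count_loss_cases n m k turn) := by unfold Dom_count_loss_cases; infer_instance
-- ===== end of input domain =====

-- B replaces A's ternary recursion by a bottom-up DP over (turn level, n) (n+m is invariant): a different algorithm, same exact values.

-- ===== PORT A =====
-- A's recursion, fuel = k - turn (the exact number of steps until `turn == k`;
-- inside Pre_ the `| 0 =>` fallback 0 is never reached except through `turn = k`).
def countA_go : Nat → Int → Int → Int → Int → Int
  | 0, n, m, k, turn =>
      if n = 0 ∨ m = 0 then 1 else if turn = k then 0 else 0
  | (f+1), n, m, k, turn =>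
      if n = 0 ∨ m = 0 then 1 else if turn = k then 0 else
        countA_go f (n+1) (m-1) k (turn+1) + countA_go f (n-1) (m+1) k (turn+1)
          + countA_go f n m k (turn+1)

def count_loss_cases (n : Int) (m : Int) (k : Int) (turn : Int) : Int :=
  countA_go (k - turn).toNat n m k turn

-- ===== PORT B =====
-- the `for level in range(d-1, -1, -1)` loop of Source B: argument = number of remaining levels
def altLevels (n : Int) (s : Int) : Nat → List Int → List Int
  | 0, cur => cur
  | (lvl+1), cur =>
      let nxt := (List.range (2*lvl+1)).map (fun (i : Nat) =>
        let x := n - (lvl : Int) + (i : Int)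
        if x = 0 ∨ x = s then (1 : Int)
        else cur.getD i 0 + cur.getD (i+1) 0 + cur.getD (i+2) 0)
      altLevels n s lvl nxt

def count_loss_cases_alt (n : Int) (m : Int) (k : Int) (turn : Int) : Int :=
  if n = 0 ∨ m = 0 then 1
  else if k ≤ turn then 0
  else
    let s := n + m
    let d := (k - turn).toNat
    let cur0 := (List.range (2*d+1)).map (fun (i : Nat) =>
      if n - (d : Int) + (i : Int) = 0 ∨ n - (d : Int) + (i : Int) = s then (1 : Int) else 0)
    (altLevels n s d cur0).getD 0 0

-- ===== PRECONDITION & SPEC =====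
-- Pre_: exactly where Python A terminates; if n ≠ 0, m ≠ 0 and turn > k the
-- recursion never reaches a base case and A raises RecursionError.
def Pre_count_loss_cases (n : Int) (m : Int) (k : Int) (turn : Int) : Prop :=
  n = 0 ∨ m = 0 ∨ turn ≤ k
instance (n : Int) (m : Int) (k : Int) (turn : Int) : Decidable (Pre_count_loss_cases n m k turn) := by unfold Pre_count_loss_cases; infer_instance
def pvWitness_count_loss_cases : Int × Int × Int × Int := (2, 2, 3, 0)

-- When n ≠ 0 and m ≠ 0 and turn > k, A recurses forever (RecursionError); B returns 0.
def Raises_count_loss_cases (n : Int) (m : Int) (k : Int) (turn : Int) : Prop :=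
  n ≠ 0 ∧ m ≠ 0 ∧ k < turn
instance (n : Int) (m : Int) (k : Int) (turn : Int) : Decidable (Raises_count_loss_cases n m k turn) := by unfold Raises_count_loss_cases; infer_instance
def pvRaiseWitness_count_loss_cases : Int × Int × Int × Int := (1, 1, 0, 1)
def pvRaiseWitnessOut_count_loss_cases : Int := 0

def Spec_count_loss_cases (n : Int) (m : Int) (k : Int) (turn : Int) (out : Int) : Prop := out = count_loss_cases_alt n m k turn
instance (n : Int) (m : Int) (k : Int) (turn : Int) (out : Int) : Decidable (Spec_count_loss_cases n m k turn out) := by unfold Spec_count_loss_cases; infer_instance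

-- ===== CLAIM (what is proved, stated in full; the proofs are below) =====
def Claim_equal_count_loss_cases : Prop := ∀ (n : Int) (m : Int) (k : Int) (turn : Int), Dom_count_loss_cases n m k turn → Pre_count_loss_cases n m k turn → Spec_count_loss_cases n m k turn (count_loss_cases n m k turn)
def Claim_raises_count_loss_cases : Prop := (∀ (n : Int) (m : Int) (k : Int) (turn : Int), Dom_count_loss_cases n m k turn → Raises_count_loss_cases n m k turn → ¬ Pre_count_loss_cases n m k turn) ∧ (Dom_count_loss_cases (pvRaiseWitness_count_loss_cases.1) (pvRaiseWitness_count_loss_cases.2.1) (pvRaiseWitness_count_loss_cases.2.2.1) (pvRaiseWitness_count_loss_cases.2.2.2) ∧ Raises_count_loss_cases (pvRaiseWitness_count_loss_cases.1) (pvRaiseWitness_count_loss_cases.2.1) (pvRaiseWitness_count_loss_cases.2.2.1) (pvRaiseWitness_count_loss_cases.2.2.2) ∧ count_loss_cases_alt (pvRaiseWitness_count_loss_cases.1) (pvRaiseWitness_count_loss_cases.2.1) (pvRaiseWitness_count_loss_cases.2.2.1) (pvRaiseWitness_count_loss_cases.2.2.2) = pvRaiseWitnessOut_count_loss_cases)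

-- ===== LEMMAS AND PROOFS =====

-- the common mathematical value: F d x s = number of loss sequences in d remaining turns,
-- state x marbles (other player has s - x)
def F : Nat → Int → Int → Int
  | 0, x, s => if x = 0 ∨ x = s then 1 else 0
  | (d+1), x, s =>
      if x = 0 ∨ x = s then 1
      else F d (x+1) s + F d (x-1) s + F d x s

lemma countA_go_eq_F : ∀ (fuel : Nat) (n m k turn : Int),
    fuel = (k - turn).toNat → turn ≤ k →
    countA_go fuel n m k turn = F fuel n (n + m) := by
  intro fuel
  induction fuel with
  | zero =>
      intro n m k turn hf ht
      have hk : turn = k := by omega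
      have hnm : (n = 0 ∨ n = n + m) ↔ (n = 0 ∨ m = 0) := by constructor <;> omega
      simp [countA_go, F, hk]
  | succ f ih =>
      intro n m k turn hf ht
      have hk : turn ≠ k := by omega
      have hf' : f = (k - (turn + 1)).toNat := by omega
      have ht' : turn + 1 ≤ k := by omega
      have hnm : (n = 0 ∨ n = n + m) ↔ (n = 0 ∨ m = 0) := by constructor <;> omega
      simp only [countA_go, F, hk, if_false, hnm]
      by_cases hb : n = 0 ∨ m = 0
      · simp [hb]
      · simp only [hb, if_false]
        rw [ih (n+1) (m-1) k (turn+1) hf' ht', ih (n-1) (m+1) k (turn+1) hf' ht',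
            ih n m k (turn+1) hf' ht']
        have e1 : n + 1 + (m - 1) = n + m := by ring
        have e2 : n - 1 + (m + 1) = n + m := by ring
        rw [e1, e2]

lemma getD_range_map (h : Nat → Int) (len i : Nat) (hi : i < len) :
    ((List.range len).map h).getD i 0 = h i := by
  rw [List.getD_eq_getElem?_getD]
  simp [hi]

def mkLevel (n s : Int) (lvl e : Nat) : List Int :=
  (List.range (2*lvl+1)).map (fun (i : Nat) => F e (n - (lvl : Int) + (i : Int)) s)

lemma altLevels_mkLevel (n s : Int) : ∀ (lvl e : Nat),
    altLevels n s lvl (mkLevel n s lvl e) = mkLevel n s 0 (lvl + e) := by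
  intro lvl
  induction lvl with
  | zero => intro e; simp [altLevels]
  | succ lvl ih =>
      intro e
      have hstep : (List.range (2*lvl+1)).map (fun (i : Nat) =>
          let x := n - (lvl : Int) + (i : Int)
          if x = 0 ∨ x = s then (1 : Int)
          else (mkLevel n s (lvl+1) e).getD i 0 + (mkLevel n s (lvl+1) e).getD (i+1) 0
            + (mkLevel n s (lvl+1) e).getD (i+2) 0)
          = mkLevel n s lvl (e+1) := by
        unfold mkLevel
        apply List.map_congr_left
        intro i hi
        have hi' : i < 2*lvl+1 := List.mem_range.mp hi
        have h0 : i < 2*(lvl+1)+1 := by omega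
        have h1 : i + 1 < 2*(lvl+1)+1 := by omega
        have h2 : i + 2 < 2*(lvl+1)+1 := by omega
        rw [getD_range_map _ _ _ h0, getD_range_map _ _ _ h1, getD_range_map _ _ _ h2]
        push_cast
        show (if n - (lvl:Int) + i = 0 ∨ n - (lvl:Int) + i = s then (1:Int) else _) = F (e+1) (n - (lvl:Int) + i) s
        have c0 : n - ((lvl:Int)+1) + (i : Int) = (n - (lvl:Int) + i) - 1 := by ring
        have c1 : n - ((lvl:Int)+1) + ((i:Int)+1) = n - (lvl:Int) + i := by ring
        have c2 : n - ((lvl:Int)+1) + ((i:Int)+2) = (n - (lvl:Int) + i) + 1 := by ring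
        rw [c0, c1, c2]
        set x := n - (lvl:Int) + i with hx
        by_cases hb : x = 0 ∨ x = s
        · simp [F, hb]
        · simp only [F, hb, if_false]
          ring
      show altLevels n s lvl _ = _
      rw [hstep, ih (e+1)]
      congr 1
      omega

-- ===== VERDICT (by name: the statement is the Claim_ definition above) =====
theorem count_loss_cases_spec : Claim_equal_count_loss_cases := by
  unfold Claim_equal_count_loss_cases Spec_count_loss_cases
  intro n m k turn _ hPre
  by_cases hb : n = 0 ∨ m = 0
  · unfold count_loss_cases count_loss_cases_alt
    cases h : (k - turn).toNat <;> simp [countA_go, hb]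
  · have ht : turn ≤ k := by
      rcases hPre with h | h | h
      · exact absurd (Or.inl h) hb
      · exact absurd (Or.inr h) hb
      · exact h
    by_cases hkt : k ≤ turn
    · have hk : turn = k := le_antisymm ht hkt
      have hz : (k - turn).toNat = 0 := by omega
      unfold count_loss_cases count_loss_cases_alt
      rw [hz]
      simp [countA_go, hb, hk]
    · -- main case: turn < k
      have hd : (k - turn).toNat ≠ 0 := by omega
      have hA : count_loss_cases n m k turn = F (k - turn).toNat n (n + m) := by
        unfold count_loss_cases
        exact countA_go_eq_F _ n m k turn rfl ht
      have hcur0 : (List.range (2*(k - turn).toNat+1)).map (fun (i : Nat) =>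
          if n - ((k - turn).toNat : Int) + (i : Int) = 0
             ∨ n - ((k - turn).toNat : Int) + (i : Int) = n + m then (1 : Int) else 0)
          = mkLevel n (n+m) ((k - turn).toNat) 0 := by
        unfold mkLevel
        apply List.map_congr_left
        intro i _
        simp [F]
      have hB : count_loss_cases_alt n m k turn = F (k - turn).toNat n (n + m) := by
        unfold count_loss_cases_alt
        rw [if_neg hb, if_neg hkt]
        show ((altLevels n (n+m) ((k - turn).toNat) _).getD 0 0) = _
        rw [hcur0, altLevels_mkLevel]
        unfold mkLevel
        rw [getD_range_map _ _ 0 (by omega)]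
        norm_num
      rw [hA, hB]

def count_loss_cases_raises : Claim_raises_count_loss_cases := by
  unfold Claim_raises_count_loss_cases
  constructor
  · intro n m k turn _ hr hp
    rcases hr with ⟨h1, h2, h3⟩
    rcases hp with h | h | h
    · exact h1 h
    · exact h2 h
    · omega
  · exact ⟨by decide, by decide, by decide⟩
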